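-- pv_equiv track=rewrite | github.com/smy37/Daily_Coding | classify_by_day/al_20250512.py | cal_total_usage
-- ===== SOURCE A (Python) =====
-- elec_cost = {100*2:[100, 2], 9900*3:[9900, 3], (1000000-10000)*5:[1000000-10000, 5]}
--
-- def cal_total_usage(cost):
--     usage = 0
--     cur = cost
--     for ec in elec_cost:
--         if cur >= ec:
--             usage += elec_cost[ec][0]
--             cur -= ec
--         else:
--             usage += cur//elec_cost[ec][1]
--             cur = 0
--             break
--     if cur !=0:
--         usage += cur//7
--     return usage
-- ===== SOURCE B (Python) =====
-- def cal_total_usage(cost):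
--     # Explicit piecewise cascade on cumulative cost thresholds (no dict, no loop).
--     if cost < 200:
--         return cost // 2
--     if cost < 29900:
--         return 100 + (cost - 200) // 3
--     if cost < 4979900:
--         return 10000 + (cost - 29900) // 5
--     return 1000000 + (cost - 4979900) // 7
-- ===== Notes on version B (the rewrite author's own statement) =====
-- stated objective: simpler
-- what changed: Replaces the dict-driven accumulator loop with a direct early-return piecewise formula on cumulative cost thresholds.
import Mathlib
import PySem

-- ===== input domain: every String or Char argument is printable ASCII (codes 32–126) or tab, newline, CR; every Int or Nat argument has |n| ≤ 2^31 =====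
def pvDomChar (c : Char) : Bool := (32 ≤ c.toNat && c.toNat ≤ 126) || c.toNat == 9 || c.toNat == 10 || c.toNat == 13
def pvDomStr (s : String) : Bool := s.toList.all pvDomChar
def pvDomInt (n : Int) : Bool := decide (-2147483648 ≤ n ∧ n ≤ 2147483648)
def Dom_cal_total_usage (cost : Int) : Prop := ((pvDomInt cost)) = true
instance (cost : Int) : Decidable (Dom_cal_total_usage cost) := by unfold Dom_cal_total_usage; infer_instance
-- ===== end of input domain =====

-- B replaces the dict-driven accumulator loop with a direct piecewise cascade on cumulative cost thresholds (objective: simpler).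
-- ===== PORT A =====
-- module-level dict: elec_cost = {200:[100,2], 29700:[9900,3], 4950000:[990000,5]}
def pvElecCost : PySem.Dict Int (List Int) :=
  PySem.Dict.ofList [(100 * 2, [100, 2]), (9900 * 3, [9900, 3]), ((1000000 - 10000) * 5, [1000000 - 10000, 5])]

-- the for-loop over the dict (break returns cur = 0); indexing [0]/[1] on the literal two-element lists always succeeds
def calLoopA : List (Int × List Int) → Int → Int → Int × Int
  | [], usage, cur => (usage, cur)
  | (ec, _) :: rest, usage, cur =>
    if cur ≥ ec then
      calLoopA rest (usage + (PySem.List.pyGet? (PySem.Dict.getD pvElecCost ec []) 0).getD 0) (cur - ec)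
    else
      (usage + PySem.Int.floordiv cur ((PySem.List.pyGet? (PySem.Dict.getD pvElecCost ec []) 1).getD 0), 0)

def cal_total_usage (cost : Int) : Int :=
  let r := calLoopA pvElecCost.items 0 cost
  if r.2 ≠ 0 then r.1 + PySem.Int.floordiv r.2 7 else r.1

-- ===== PORT B =====
def cal_total_usage_alt (cost : Int) : Int :=
  if cost < 200 then PySem.Int.floordiv cost 2
  else if cost < 29900 then 100 + PySem.Int.floordiv (cost - 200) 3
  else if cost < 4979900 then 10000 + PySem.Int.floordiv (cost - 29900) 5
  else 1000000 + PySem.Int.floordiv (cost - 4979900) 7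

-- ===== PRECONDITION & SPEC =====
def Spec_cal_total_usage (cost : Int) (out : Int) : Prop := out = cal_total_usage_alt cost
instance (cost : Int) (out : Int) : Decidable (Spec_cal_total_usage cost out) := by unfold Spec_cal_total_usage; infer_instance

-- ===== CLAIM (what is proved, stated in full; the proofs are below) =====
def Claim_equal_cal_total_usage : Prop := ∀ (cost : Int), Dom_cal_total_usage cost → Spec_cal_total_usage cost (cal_total_usage cost)

-- ===== LEMMAS AND PROOFS =====

-- ===== VERDICT (by name: the statement is the Claim_ definition above) =====
theorem cal_total_usage_spec : Claim_equal_cal_total_usage := by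
  intro cost _
  unfold Spec_cal_total_usage
  have hit : pvElecCost.items =
      [(200, ([100, 2] : List Int)), (29700, [9900, 3]), (4950000, [990000, 5])] := by decide
  have e1 : (PySem.List.pyGet? (PySem.Dict.getD pvElecCost 200 []) 0).getD 0 = 100 := by decide
  have e2 : (PySem.List.pyGet? (PySem.Dict.getD pvElecCost 200 []) 1).getD 0 = 2 := by decide
  have e3 : (PySem.List.pyGet? (PySem.Dict.getD pvElecCost 29700 []) 0).getD 0 = 9900 := by decide
  have e4 : (PySem.List.pyGet? (PySem.Dict.getD pvElecCost 29700 []) 1).getD 0 = 3 := by decide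
  have e5 : (PySem.List.pyGet? (PySem.Dict.getD pvElecCost 4950000 []) 0).getD 0 = 990000 := by decide
  have e6 : (PySem.List.pyGet? (PySem.Dict.getD pvElecCost 4950000 []) 1).getD 0 = 5 := by decide
  simp only [cal_total_usage, cal_total_usage_alt, hit, calLoopA, e1, e2, e3, e4, e5, e6]
  norm_num
  split_ifs <;> simp only [Prod.fst, Prod.snd, not_lt, not_le, ne_eq, not_not] at * <;>
    first
      | omega
      | ring
      | (rw [show cost - 200 - 29700 - 4950000 = cost - 4979900 by ring])
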